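-- pv_equiv track=rewrite | github.com/estebandelaf/curso-programacion | ejemplos/python3/06_funciones/08_bin_impar_unos.py | bin_impar_unos
-- ===== SOURCE A (Python) =====
-- def bin_impar_unos(string) :
--     estado = 0
--     for digito in string :
--         if estado == 0 and digito == "1" :
--             estado = 1
--         elif estado == 1 and digito == "1" :
--             estado = 0
--     if estado == 1 :
--         return True
--     else :
--         return False
-- ===== SOURCE B (Python) =====
-- def bin_impar_unos(string):
--     return string.count("1") % 2 == 1
-- ===== Notes on version B (the rewrite author's own statement) =====
-- stated objective: simpler
-- what changed: Replaces the two-state parity automaton threaded through an explicit Python loop by counting the one-digits with str.count and returning the parity of that count.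
import Mathlib
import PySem

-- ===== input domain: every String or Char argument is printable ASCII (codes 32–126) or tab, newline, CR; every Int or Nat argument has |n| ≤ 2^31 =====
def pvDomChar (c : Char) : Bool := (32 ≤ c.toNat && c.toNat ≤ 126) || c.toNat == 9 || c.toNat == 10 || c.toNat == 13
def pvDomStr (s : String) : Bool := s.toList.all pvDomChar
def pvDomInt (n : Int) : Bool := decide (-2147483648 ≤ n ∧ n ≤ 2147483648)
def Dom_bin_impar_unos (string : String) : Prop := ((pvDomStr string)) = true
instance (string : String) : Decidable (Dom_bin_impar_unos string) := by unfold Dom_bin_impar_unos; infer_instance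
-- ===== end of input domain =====

-- B replaces A's two-state parity automaton by count-the-'1's-then-take-parity (simpler).


-- ===== PORT A =====
-- the loop body of A ('if estado == 0 and digito == "1": … elif …')
def pvStepA (estado : Int) (digito : Char) : Int :=
  if estado == (0:Int) && digito == '1' then 1
  else if estado == 1 && digito == '1' then 0
  else estado

def bin_impar_unos (string : String) : Bool :=
  let estado := string.toList.foldl pvStepA 0
  if estado == 1 then true else false

-- ===== PORT B =====
def bin_impar_unos_alt (string : String) : Bool :=
  PySem.Str.count string "1" % 2 == 1

-- ===== PRECONDITION & SPEC =====
def Spec_bin_impar_unos (string : String) (out : Bool) : Prop := out = bin_impar_unos_alt string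
instance (string : String) (out : Bool) : Decidable (Spec_bin_impar_unos string out) := by unfold Spec_bin_impar_unos; infer_instance

-- ===== CLAIM (what is proved, stated in full; the proofs are below) =====
def Claim_equal_bin_impar_unos : Prop := ∀ (string : String), Dom_bin_impar_unos string → Spec_bin_impar_unos string (bin_impar_unos string)

-- ===== LEMMAS AND PROOFS =====

-- Chars.count.go for a single-character needle counts occurrences of that character.
lemma go_single (c : Char) : ∀ (cs : List Char) (fuel acc : Nat), cs.length ≤ fuel →
    PySem.Chars.count.go [c] fuel cs acc = acc + cs.count c := by
  intro cs
  induction cs with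
  | nil => intro fuel acc h; cases fuel <;> simp [PySem.Chars.count.go]
  | cons x t ih =>
    intro fuel acc h
    cases fuel with
    | zero => simp at h
    | succ n =>
      simp only [PySem.Chars.count.go, List.isPrefixOf]
      by_cases hx : x = c
      · subst hx
        simp [ih n (acc + 1) (by simpa using h)]
        omega
      · simp [hx, ih n acc (by simpa using h), Ne.symm hx]

lemma count_single (cs : List Char) (c : Char) :
    PySem.Chars.count cs [c] = cs.count c := by
  simp [PySem.Chars.count, go_single c cs cs.length 0 le_rfl]

-- A's toggle loop computes the parity of the number of '1's (offset by the initial state).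
lemma loop_parity (cs : List Char) : ∀ e : Int, e = 0 ∨ e = 1 →
    cs.foldl pvStepA e = if (cs.count '1' + e.toNat) % 2 = 1 then 1 else 0 := by
  induction cs with
  | nil => rintro e (rfl|rfl) <;> decide
  | cons x t ih =>
    rintro e he
    rw [List.foldl_cons]
    by_cases hx : x = '1'
    · subst hx
      rcases he with rfl | rfl
      · rw [show pvStepA 0 '1' = 1 from rfl, ih 1 (Or.inr rfl), List.count_cons]
        simp only [beq_self_eq_true, if_true, Int.toNat_one, Int.toNat_zero, Nat.add_zero]
        split_ifs <;> omega
      · rw [show pvStepA 1 '1' = 0 from rfl, ih 0 (Or.inl rfl), List.count_cons]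
        simp only [beq_self_eq_true, if_true, Int.toNat_one, Int.toNat_zero, Nat.add_zero]
        split_ifs <;> omega
    · have hstep : pvStepA e x = e := by
        rcases he with rfl | rfl <;> simp [pvStepA, hx]
      rw [hstep, ih e he, List.count_cons]
      simp [hx]

lemma parity_main (s : String) : bin_impar_unos s = bin_impar_unos_alt s := by
  unfold bin_impar_unos bin_impar_unos_alt
  rw [show PySem.Str.count s "1" = PySem.Chars.count s.toList "1".toList from by simp]
  rw [show ("1".toList : List Char) = ['1'] from rfl, count_single,
    loop_parity s.toList 0 (Or.inl rfl)]
  simp only [Int.toNat_zero, Nat.add_zero]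
  by_cases h : s.toList.count '1' % 2 = 1
  · simp [h]
  · simp [h]

-- ===== VERDICT (by name: the statement is the Claim_ definition above) =====
theorem bin_impar_unos_spec : Claim_equal_bin_impar_unos := by
  intro s _
  unfold Spec_bin_impar_unos
  exact parity_main s
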